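-- pv_equiv track=rewrite | github.com/eneserdo/FGSE | visualization_utils.py | determine_xlabels_and_xticks_positions
-- ===== SOURCE A (Python) =====
-- from itertools import groupby
--
-- def determine_xlabels_and_xticks_positions(labels: list, bar_width: int):
--     """Simplify segmentation labelling in case of frame-wise segmentation.
--
--     From a list of frame-level labels, extract the unique labels and determine x-axis positions to plot them.
--
--     Arguments:
--         labels - Video segmentation as a list of labels.
--         bar_width - Width of a single segment bar in the expected plot.
--     Returns:
--         Two lists. The first one contains the unique labels in labels, and the second contain the x-axis position to
--         place the labels in the final segmentation plot.
--     """
--     unique_labels, xticks, cumulative_length = [], [], 0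
--     for k, v in groupby(labels):
--         unique_labels.append(k)
--         num_frames = len(list(v))
--         if xticks:
--             xticks.append(cumulative_length + (num_frames // 3))
--         else:
--             xticks.append(num_frames // 3)
--         xticks[-1] *= bar_width
--         cumulative_length += num_frames
--     return unique_labels, xticks
-- ===== SOURCE B (Python) =====
-- def determine_xlabels_and_xticks_positions(labels: list, bar_width: int):
--     if not labels:
--         return [], []
--     # Boundary detection: a new run starts at index 0 and wherever a label
--     # differs from its predecessor (found by zipping the list with its shift).
--     changes = [(i, b) for i, (a, b) in enumerate(zip(labels, labels[1:]), 1) if a != b]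
--     starts = [0] + [i for i, _ in changes]
--     names = [labels[0]] + [b for _, b in changes]
--     ends = starts[1:] + [len(labels)]
--     xticks = [(s + (e - s) // 3) * bar_width for s, e in zip(starts, ends)]
--     return names, xticks
-- ===== Notes on version B (the rewrite author's own statement) =====
-- stated objective: alternative
-- what changed: B replaces A's streaming groupby loop with a cumulative-length counter by boundary detection: it zips the list with its own shift to find the indices where the label changes, takes those change indices directly as run starts, pairs them with the next boundary to get run ends, and computes each tick from the (start, end) index pair.
import Mathlib
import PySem

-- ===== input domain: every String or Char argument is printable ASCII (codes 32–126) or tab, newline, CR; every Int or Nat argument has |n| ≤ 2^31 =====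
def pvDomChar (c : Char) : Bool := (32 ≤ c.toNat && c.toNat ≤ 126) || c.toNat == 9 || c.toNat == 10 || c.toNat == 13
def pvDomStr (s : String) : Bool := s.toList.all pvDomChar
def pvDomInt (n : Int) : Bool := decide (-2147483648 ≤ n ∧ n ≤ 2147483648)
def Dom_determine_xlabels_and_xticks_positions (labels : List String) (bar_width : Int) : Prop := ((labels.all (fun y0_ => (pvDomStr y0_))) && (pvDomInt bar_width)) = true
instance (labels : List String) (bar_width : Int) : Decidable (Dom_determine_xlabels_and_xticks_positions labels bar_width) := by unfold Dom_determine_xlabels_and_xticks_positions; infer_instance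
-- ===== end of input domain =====

-- B replaces A's groupby stream + cumulative counter by adjacent-pair boundary detection
-- (change indices are the run starts) — objective: alternative decomposition, same cost.

-- ===== PORT A =====
-- itertools.groupby streamed to (key, group-length) pairs, left to right
def pvRunsAux (k : String) (n : Nat) : List String → List (String × Nat)
  | [] => [(k, n)]
  | y :: ys => if y = k then pvRunsAux k (n + 1) ys else (k, n) :: pvRunsAux y 1 ys

def pvRunLengths : List String → List (String × Nat)
  | [] => []
  | x :: xs => pvRunsAux x 1 xs

-- literal port of A's loop: state (unique_labels, xticks, cumulative_length)
def determine_xlabels_and_xticks_positions (labels : List String) (bar_width : Int) : List String × List Int :=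
  let st := (pvRunLengths labels).foldl
    (fun (st : List String × List Int × Nat) kn =>
      let t : Int := (if st.2.1.isEmpty then ((kn.2 / 3 : Nat) : Int)
                      else ((st.2.2 + kn.2 / 3 : Nat) : Int)) * bar_width
      (st.1 ++ [kn.1], st.2.1 ++ [t], st.2.2 + kn.2))
    ([], [], 0)
  (st.1, st.2.1)

-- ===== PORT B =====
-- transliteration of Source B: change points from zip(labels, labels[1:]) with enumerate(…, 1)
def determine_xlabels_and_xticks_positions_alt (labels : List String) (bar_width : Int) : List String × List Int :=
  match labels with
  | [] => ([], [])
  | x :: _ =>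
    let changes := ((labels.zip labels.tail).zipIdx 1).filterMap
      (fun p => if p.1.1 ≠ p.1.2 then some (p.2, p.1.2) else none)
    let starts := 0 :: changes.map Prod.fst
    let names := x :: changes.map Prod.snd
    let ends := starts.tail ++ [labels.length]
    (names, (starts.zip ends).map (fun se => ((se.1 + (se.2 - se.1) / 3 : Nat) : Int) * bar_width))

-- ===== PRECONDITION & SPEC =====
def Spec_determine_xlabels_and_xticks_positions (labels : List String) (bar_width : Int) (out : List String × List Int) : Prop := out = determine_xlabels_and_xticks_positions_alt labels bar_width
instance (labels : List String) (bar_width : Int) (out : List String × List Int) : Decidable (Spec_determine_xlabels_and_xticks_positions labels bar_width out) := by unfold Spec_determine_xlabels_and_xticks_positions; infer_instance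

-- ===== CLAIM (what is proved, stated in full; the proofs are below) =====
def Claim_equal_determine_xlabels_and_xticks_positions : Prop := ∀ (labels : List String) (bar_width : Int), Dom_determine_xlabels_and_xticks_positions labels bar_width → Spec_determine_xlabels_and_xticks_positions labels bar_width (determine_xlabels_and_xticks_positions labels bar_width)

-- ===== LEMMAS AND PROOFS =====
-- exclusive prefix sums of the run lengths (proof-side abstraction)
def pvExclScan : List Nat → Nat → List Nat
  | [], _ => []
  | n :: t, a => a :: pvExclScan t (a + n)

-- structural form of B's change-point comprehension
def pvW : String → List String → Nat → List (Nat × String)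
  | _, [], _ => []
  | prev, y :: ys, i => (if prev ≠ y then [(i, y)] else []) ++ pvW y ys (i + 1)

-- A's fold over the runs equals (keys, zipWith tick (exclusive scan) lengths)
theorem pv_fold_eq (bw : Int) (runs : List (String × Nat)) :
    ∀ (uniq : List String) (ticks : List Int) (cum : Nat), (ticks = [] → cum = 0) →
    (let st := runs.foldl
        (fun (st : List String × List Int × Nat) kn =>
          let t : Int := (if st.2.1.isEmpty then ((kn.2 / 3 : Nat) : Int)
                          else ((st.2.2 + kn.2 / 3 : Nat) : Int)) * bw
          (st.1 ++ [kn.1], st.2.1 ++ [t], st.2.2 + kn.2))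
        (uniq, ticks, cum)
     (st.1, st.2.1))
    = (uniq ++ runs.map Prod.fst,
       ticks ++ List.zipWith (fun s n => ((s + n / 3 : Nat) : Int) * bw)
                 (pvExclScan (runs.map Prod.snd) cum) (runs.map Prod.snd)) := by
  induction runs with
  | nil => intro uniq ticks cum _; simp [pvExclScan]
  | cons kn rs ih =>
    intro uniq ticks cum h
    have ht : (if ticks.isEmpty then ((kn.2 / 3 : Nat) : Int)
               else ((cum + kn.2 / 3 : Nat) : Int)) = ((cum + kn.2 / 3 : Nat) : Int) := by
      cases ticks with
      | nil => simp [h rfl]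
      | cons a l => simp
    simp only [List.foldl_cons, List.map_cons, pvExclScan, List.zipWith_cons_cons]
    rw [ht]
    rw [ih (uniq ++ [kn.1]) (ticks ++ [((cum + kn.2 / 3 : Nat) : Int) * bw]) (cum + kn.2)
        (by simp)]
    simp

-- B's zip/zipIdx/filterMap comprehension is the structural walk pvW
theorem pv_changes_eq_W (xs : List String) : ∀ (prev : String) (i : Nat),
    (((prev :: xs).zip xs).zipIdx i).filterMap
      (fun p => if p.1.1 ≠ p.1.2 then some (p.2, p.1.2) else none)
    = pvW prev xs i := by
  induction xs with
  | nil => intro prev i; simp [pvW]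
  | cons y ys ih =>
    intro prev i
    simp only [List.zip_cons_cons, List.zipIdx_cons, List.filterMap_cons, pvW]
    rw [← ih y (i + 1)]
    by_cases h : prev = y <;> simp [h]

-- runs vs change points: keys, exclusive scan, and total length
theorem pv_runs_W (xs : List String) : ∀ (k : String) (n i s : Nat), i = s + n →
    (pvRunsAux k n xs).map Prod.fst = k :: (pvW k xs i).map Prod.snd
    ∧ pvExclScan ((pvRunsAux k n xs).map Prod.snd) s = s :: (pvW k xs i).map Prod.fst
    ∧ s + ((pvRunsAux k n xs).map Prod.snd).sum = i + xs.length := by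
  induction xs with
  | nil => intro k n i s hi; simp [pvRunsAux, pvW, pvExclScan, hi]
  | cons y ys ih =>
    intro k n i s hi
    by_cases h : y = k
    · subst h
      obtain ⟨h1, h2, h3⟩ := ih y (n + 1) (i + 1) s (by omega)
      refine ⟨?_, ?_, ?_⟩
      · simpa [pvRunsAux, pvW] using h1
      · simpa [pvRunsAux, pvW] using h2
      · have e : pvRunsAux y n (y :: ys) = pvRunsAux y (n + 1) ys := by simp [pvRunsAux]
        rw [e, List.length_cons]
        omega
    · obtain ⟨h1, h2, h3⟩ := ih y 1 (i + 1) i rfl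
      have hne : k ≠ y := fun e => h e.symm
      simp only [pvRunsAux, pvW, if_neg h, if_pos hne, List.map_cons, pvExclScan,
        List.length_cons, List.sum_cons, List.map_append]
      refine ⟨by simp [h1], ?_, ?_⟩
      · rw [show s + n = i by omega, h2]; simp
      · omega

-- ticks over (start, end) index pairs equal ticks over (start, length) pairs
theorem pv_ends_eq (f : Nat → Nat → Int) : ∀ (lens : List Nat) (s0 : Nat),
    ((pvExclScan lens s0).zip ((pvExclScan lens s0).tail ++ [s0 + lens.sum])).map
      (fun p => f p.1 (p.2 - p.1))
    = List.zipWith f (pvExclScan lens s0) lens := by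
  intro lens
  induction lens with
  | nil => intro s0; simp [pvExclScan]
  | cons n t ih =>
    intro s0
    cases t with
    | nil => simp [pvExclScan]
    | cons m t' =>
      have h := ih (s0 + n)
      simp only [pvExclScan, List.sum_cons, List.tail_cons, List.cons_append,
        List.zip_cons_cons, List.map_cons, List.zipWith_cons_cons] at h ⊢
      rw [show s0 + (n + (m + t'.sum)) = s0 + n + (m + t'.sum) by omega]
      rw [h]
      simp

-- ===== VERDICT (by name: the statement is the Claim_ definition above) =====
theorem determine_xlabels_and_xticks_positions_spec : Claim_equal_determine_xlabels_and_xticks_positions := by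
  intro labels bar_width _
  unfold Spec_determine_xlabels_and_xticks_positions determine_xlabels_and_xticks_positions determine_xlabels_and_xticks_positions_alt
  cases labels with
  | nil => simp [pvRunLengths]
  | cons x xs =>
    have hA := pv_fold_eq bar_width (pvRunsAux x 1 xs) [] [] 0 (fun _ => rfl)
    obtain ⟨h1, h2, h3⟩ := pv_runs_W xs x 1 1 0 rfl
    have hC := pv_changes_eq_W xs x 1
    simp only [pvRunLengths, List.tail_cons]
    rw [hA]
    simp only [List.nil_append, Prod.mk.injEq, hC]
    refine ⟨by rw [h1], ?_⟩
    rw [← h2,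
      show (pvW x xs 1).map Prod.fst
          = (pvExclScan ((pvRunsAux x 1 xs).map Prod.snd) 0).tail from by rw [h2]; rfl,
      show (x :: xs).length = 0 + ((pvRunsAux x 1 xs).map Prod.snd).sum from by
        simp only [List.length_cons]; omega]
    exact (pv_ends_eq (fun s n => ((s + n / 3 : Nat) : Int) * bar_width)
      ((pvRunsAux x 1 xs).map Prod.snd) 0).symm
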